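-- pv_equiv track=rewrite | github.com/khadimfall2/ProjetI-abhm | ProjetIA&abhm/classes/strategy.py | count_pieces_in_line
-- ===== SOURCE A (Python) =====
-- def count_pieces_in_line(line, player):
--     count = 0
--     for piece in line:
--         if piece == player:
--             count += 1
--         elif piece == 3 - player:
--             return 0
--     return count
-- ===== SOURCE B (Python) =====
-- def count_pieces_in_line(line, player):
--     if (3 - player) in line:
--         return 0
--     return line.count(player)
-- ===== Notes on version B (the rewrite author's own statement) =====
-- stated objective: idiomatic
-- what changed: Replaced the fused early-exit counting loop with two library passes: a membership test for the opponent (return 0) and then list.count for the player.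
import Mathlib
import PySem

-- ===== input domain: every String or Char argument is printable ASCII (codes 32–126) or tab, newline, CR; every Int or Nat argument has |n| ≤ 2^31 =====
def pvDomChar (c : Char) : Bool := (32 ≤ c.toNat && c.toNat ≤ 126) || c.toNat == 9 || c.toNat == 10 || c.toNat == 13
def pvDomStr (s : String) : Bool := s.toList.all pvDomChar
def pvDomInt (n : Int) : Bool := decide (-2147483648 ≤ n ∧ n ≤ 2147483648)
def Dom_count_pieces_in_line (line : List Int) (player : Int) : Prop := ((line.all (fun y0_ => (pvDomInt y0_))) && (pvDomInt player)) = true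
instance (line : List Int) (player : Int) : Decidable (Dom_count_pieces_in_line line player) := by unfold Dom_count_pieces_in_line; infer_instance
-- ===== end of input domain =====

-- ===== PORT A =====
-- B splits A's fused early-exit loop into two library passes (membership, then count); idiomatic, same cost.
def count_pieces_in_line_go (player : Int) : List Int → Int → Int
  | [], count => count
  | piece :: rest, count =>
      if piece = player then count_pieces_in_line_go player rest (count + 1)
      else if piece = 3 - player then 0
      else count_pieces_in_line_go player rest count

def count_pieces_in_line (line : List Int) (player : Int) : Int :=
  count_pieces_in_line_go player line 0

-- ===== PORT B =====
def count_pieces_in_line_alt (line : List Int) (player : Int) : Int :=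
  if (3 - player) ∈ line then 0 else (PySem.List.count line player : Int)

-- ===== PRECONDITION & SPEC =====
def Spec_count_pieces_in_line (line : List Int) (player : Int) (out : Int) : Prop := out = count_pieces_in_line_alt line player
instance (line : List Int) (player : Int) (out : Int) : Decidable (Spec_count_pieces_in_line line player out) := by unfold Spec_count_pieces_in_line; infer_instance

-- ===== CLAIM (what is proved, stated in full; the proofs are below) =====
def Claim_equal_count_pieces_in_line : Prop := ∀ (line : List Int) (player : Int), Dom_count_pieces_in_line line player → Spec_count_pieces_in_line line player (count_pieces_in_line line player)

-- ===== LEMMAS AND PROOFS =====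
theorem count_pieces_in_line_go_eq (player : Int) (line : List Int) (count : Int) :
    count_pieces_in_line_go player line count =
      if (3 - player) ∈ line then 0 else count + (PySem.List.count line player : Int) := by
  have hkey : ¬ (3 - player = player) := by omega
  induction line generalizing count with
  | nil => simp [count_pieces_in_line_go, PySem.List.count]
  | cons p rest ih =>
      by_cases hp : p = player
      · subst hp
        rw [count_pieces_in_line_go, if_pos rfl, ih]
        simp only [List.mem_cons, hkey, false_or, PySem.List.count, List.count_cons]
        split
        · rfl
        · simp only [BEq.rfl, if_true]; omega
      · by_cases ho : p = 3 - player
        · rw [count_pieces_in_line_go, if_neg hp, if_pos ho]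
          simp [ho]
        · rw [count_pieces_in_line_go, if_neg hp, if_neg ho, ih]
          have hmem : (3 - player) ∈ p :: rest ↔ (3 - player) ∈ rest := by
            simp only [List.mem_cons, or_iff_right_iff_imp]
            intro h; exact absurd h.symm ho
          simp only [hmem]
          simp only [PySem.List.count, List.count_cons]
          simp [hp]

-- ===== VERDICT (by name: the statement is the Claim_ definition above) =====
theorem count_pieces_in_line_spec : Claim_equal_count_pieces_in_line := by
  intro line player _
  unfold Spec_count_pieces_in_line count_pieces_in_line count_pieces_in_line_alt
  rw [count_pieces_in_line_go_eq]
  split <;> simp
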